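-- pv_equiv track=rewrite | github.com/noelbolando/agentic-ai-sir-system | model/analysis/statistics.py | get_peak_sir_stats
-- ===== SOURCE A (Python) =====
-- def get_peak_sir_stats(logs):
--     """Get peak values and times for S, I, and R for each run."""
--     results = []
--
--     for run_id, run in enumerate(logs):
--         s_values = [entry[0] for entry in run]
--         i_values = [entry[1] for entry in run]
--         r_values = [entry[2] for entry in run]
--
--         peak_num_s = max(s_values)
--         peak_num_s_step = s_values.index(peak_num_s)
--
--         peak_num_i = max(i_values)
--         peak_num_i_step = i_values.index(peak_num_i)
--
--         peak_num_r = max(r_values)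
--         peak_num_r_step = r_values.index(peak_num_r)
--
--         results.append({
--             "run_id": run_id,
--             "num_peak_susceptible": peak_num_s,
--             "peak_susceptible_step": peak_num_s_step,
--             "num_peak_infected": peak_num_i,
--             "peak_infected_step": peak_num_i_step,
--             "num_peak_recovered": peak_num_r,
--             "peak_recovered_step": peak_num_r_step,
--         })
--
--     return results
-- ===== SOURCE B (Python) =====
-- def get_peak_sir_stats(logs):
--     """Get peak values and times for S, I, and R for each run."""
--     results = []
--     for run_id, run in enumerate(logs):
--         ps, pi, pr = run[0][0], run[0][1], run[0][2]
--         ss = ii = rr = 0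
--         step = 1
--         for entry in run[1:]:
--             s, i, r = entry[0], entry[1], entry[2]
--             if s > ps:
--                 ps, ss = s, step
--             if i > pi:
--                 pi, ii = i, step
--             if r > pr:
--                 pr, rr = r, step
--             step += 1
--         results.append({
--             "run_id": run_id,
--             "num_peak_susceptible": ps,
--             "peak_susceptible_step": ss,
--             "num_peak_infected": pi,
--             "peak_infected_step": ii,
--             "num_peak_recovered": pr,
--             "peak_recovered_step": rr,
--         })
--     return results
-- ===== Notes on version B (the rewrite author's own statement) =====
-- stated objective: simpler
-- what changed: Replaces building three value lists per run and calling max plus list.index on each with a single combined pass over the run that maintains six running peak/step values (strict > keeps the first occurrence).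
import Mathlib
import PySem

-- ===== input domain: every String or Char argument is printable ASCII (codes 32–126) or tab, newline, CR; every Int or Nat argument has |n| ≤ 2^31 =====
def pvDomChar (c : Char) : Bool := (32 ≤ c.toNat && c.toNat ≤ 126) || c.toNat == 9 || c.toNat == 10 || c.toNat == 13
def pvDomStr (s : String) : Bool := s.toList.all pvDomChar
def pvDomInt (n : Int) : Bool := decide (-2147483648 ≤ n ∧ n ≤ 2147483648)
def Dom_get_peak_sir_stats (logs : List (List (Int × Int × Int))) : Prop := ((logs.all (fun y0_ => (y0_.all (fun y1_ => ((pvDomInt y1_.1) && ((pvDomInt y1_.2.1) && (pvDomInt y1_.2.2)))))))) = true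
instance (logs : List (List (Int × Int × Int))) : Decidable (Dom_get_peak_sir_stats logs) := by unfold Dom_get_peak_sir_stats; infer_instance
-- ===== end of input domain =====

-- B replaces A's three lists + max + list.index per run by one combined pass keeping six running values; equal return values on nonempty runs (simpler, same asymptotic cost).

-- ===== PORT A =====
-- Literal port of A: per run, build the three value lists, take max (Python max = first
-- extremal, PySem.List.max?) and its first index (list.index = PySem.List.index?).
-- max?/index? return none exactly where Python raises (empty run) — excluded by Pre_.
def get_peak_sir_stats (logs : List (List (Int × Int × Int))) : List (List (String × Int)) :=
  (PySem.List.enumerate logs 0).foldl (fun results p =>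
    let run_id := p.1
    let run := p.2
    let s_values := run.map (fun e => e.1)
    let i_values := run.map (fun e => e.2.1)
    let r_values := run.map (fun e => e.2.2)
    match PySem.List.max? s_values (fun x => x), PySem.List.max? i_values (fun x => x),
          PySem.List.max? r_values (fun x => x) with
    | some peak_s, some peak_i, some peak_r =>
      let s_step : Int := ((PySem.List.index? s_values peak_s).getD 0 : Nat)
      let i_step : Int := ((PySem.List.index? i_values peak_i).getD 0 : Nat)
      let r_step : Int := ((PySem.List.index? r_values peak_r).getD 0 : Nat)
      results ++ [[("run_id", run_id), ("num_peak_susceptible", peak_s),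
                   ("peak_susceptible_step", s_step), ("num_peak_infected", peak_i),
                   ("peak_infected_step", i_step), ("num_peak_recovered", peak_r),
                   ("peak_recovered_step", r_step)]]
    | _, _, _ => results)  -- Python raises ValueError here (empty run); outside Pre_
    []

-- ===== PORT B =====
-- B's inner loop: fold over the tail with six running values and the current step.
def pvGoB : List (Int × Int × Int) → Int × Int × Int × Int × Int × Int → Int →
    Int × Int × Int × Int × Int × Int
  | [], st, _ => st
  | (s, i, r) :: rest, (ps, ss, pi, ii, pr, rr), step =>
      pvGoB rest
        (if s > ps then s else ps, if s > ps then step else ss,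
         if i > pi then i else pi, if i > pi then step else ii,
         if r > pr then r else pr, if r > pr then step else rr)
        (step + 1)

def get_peak_sir_stats_alt (logs : List (List (Int × Int × Int))) : List (List (String × Int)) :=
  (PySem.List.enumerate logs 0).foldl (fun results p =>
    match p.2 with
    | [] => results  -- Python B raises IndexError on run[0] here; outside Pre_
    | e0 :: rest =>
      match pvGoB rest (e0.1, 0, e0.2.1, 0, e0.2.2, 0) 1 with
      | (ps, ss, pi, ii, pr, rr) =>
        results ++ [[("run_id", p.1), ("num_peak_susceptible", ps),
                     ("peak_susceptible_step", ss), ("num_peak_infected", pi),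
                     ("peak_infected_step", ii), ("num_peak_recovered", pr),
                     ("peak_recovered_step", rr)]])
    []

-- ===== PRECONDITION & SPEC =====
-- A raises ValueError (max of an empty list) on any empty run; B raises IndexError there;
-- Pre_ excludes exactly those inputs.
def Pre_get_peak_sir_stats (logs : List (List (Int × Int × Int))) : Prop :=
  ∀ run ∈ logs, run ≠ []
instance (logs : List (List (Int × Int × Int))) : Decidable (Pre_get_peak_sir_stats logs) := by
  unfold Pre_get_peak_sir_stats; infer_instance

def pvWitness_get_peak_sir_stats : (List (List (Int × Int × Int))) :=
  [[(5, 1, 0), (4, 2, 0), (4, 2, 1)], [(7, 0, 0)]]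

def Spec_get_peak_sir_stats (logs : List (List (Int × Int × Int))) (out : List (List (String × Int))) : Prop := out = get_peak_sir_stats_alt logs
instance (logs : List (List (Int × Int × Int))) (out : List (List (String × Int))) : Decidable (Spec_get_peak_sir_stats logs out) := by unfold Spec_get_peak_sir_stats; infer_instance

-- ===== CLAIM (what is proved, stated in full; the proofs are below) =====
def Claim_equal_get_peak_sir_stats : Prop := ∀ (logs : List (List (Int × Int × Int))), Dom_get_peak_sir_stats logs → Pre_get_peak_sir_stats logs → Spec_get_peak_sir_stats logs (get_peak_sir_stats logs)

-- ===== LEMMAS AND PROOFS =====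

-- running maximum with Python's first-wins rule (the value component of both sides)
def pvFmax (v : Int) (l : List Int) : Int := l.foldl (fun m x => if m < x then x else m) v

-- first index of v, as an Int (total; only used under v ∈ xs)
def pvIdx : List Int → Int → Int
  | [], _ => 0
  | x :: t, v => if x = v then 0 else 1 + pvIdx t v

-- one-component version of B's loop
def pvGo1 : List Int → Int → Int → Int → Int × Int
  | [], pv, ps, _ => (pv, ps)
  | x :: t, pv, ps, k => if pv < x then pvGo1 t x k (k + 1) else pvGo1 t pv ps (k + 1)

theorem pvLe_fmax (l : List Int) (v : Int) : v ≤ pvFmax v l := by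
  induction l generalizing v with
  | nil => simp [pvFmax]
  | cons x t ih =>
    have h1 := ih (if v < x then x else v)
    simp only [pvFmax, List.foldl_cons] at h1 ⊢
    split_ifs at h1 ⊢ with hvx
    · omega
    · exact h1

theorem pvFmax_cases (l : List Int) (v : Int) : pvFmax v l = v ∨ pvFmax v l ∈ l := by
  induction l generalizing v with
  | nil => simp [pvFmax]
  | cons x t ih =>
    have h1 := ih (if v < x then x else v)
    simp only [pvFmax, List.foldl_cons] at h1 ⊢
    rcases h1 with h | h
    · split_ifs at h ⊢ with hvx
      · exact Or.inr (by simp [h])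
      · exact Or.inl h
    · exact Or.inr (List.mem_cons_of_mem _ h)

theorem pvMax?_eq (l : List Int) (v : Int) :
    PySem.List.max? (v :: l) (fun x => x) = some (pvFmax v l) := by
  induction l generalizing v with
  | nil => rfl
  | cons x t ih =>
    have h1 : PySem.List.max? (v :: x :: t) (fun y => y)
        = PySem.List.max? ((if v < x then x else v) :: t) (fun y => y) := by
      by_cases h : v < x <;> simp [PySem.List.max?, h]
    rw [h1, ih]
    simp [pvFmax]

theorem pvIndex_getD (xs : List Int) (v : Int) (h : v ∈ xs) :
    (((PySem.List.index? xs v).getD 0 : Nat) : Int) = pvIdx xs v := by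
  induction xs with
  | nil => simp at h
  | cons x t ih =>
    by_cases hx : x = v
    · subst hx
      rw [PySem.List.index?_cons_self]
      simp [pvIdx]
    · have hv : v ∈ t := by
        rcases List.mem_cons.mp h with h1 | h1
        · exact absurd h1.symm hx
        · exact h1
      have hs : (PySem.List.index? t v).isSome :=
        (PySem.List.index?_isSome_iff t v).mpr hv
      obtain ⟨n, hn⟩ := Option.isSome_iff_exists.mp hs
      rw [PySem.List.index?_cons_of_ne t hx, hn]
      have h2 := ih hv
      rw [hn] at h2
      simp only [Option.map_some, Option.getD_some] at *
      rw [pvIdx, if_neg hx]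
      push_cast
      omega

theorem pvGo1_spec (l : List Int) (pv ps k : Int) :
    pvGo1 l pv ps k =
      (pvFmax pv l, if pvFmax pv l = pv then ps else k + pvIdx l (pvFmax pv l)) := by
  induction l generalizing pv ps k with
  | nil => simp [pvGo1, pvFmax]
  | cons x t ih =>
    have hfm : pvFmax pv (x :: t) = pvFmax (if pv < x then x else pv) t := by
      simp [pvFmax]
    by_cases hx : pv < x
    · rw [pvGo1, if_pos hx, ih, hfm, if_pos hx]
      have hle : x ≤ pvFmax x t := pvLe_fmax t x
      have hne : pvFmax x t ≠ pv := by omega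
      rw [pvIdx]
      simp only [Prod.mk.injEq, true_and]
      split_ifs <;> omega
    · rw [pvGo1, if_neg hx, ih, hfm, if_neg hx]
      by_cases hM : pvFmax pv t = pv
      · simp [hM]
      · have hle : pv ≤ pvFmax pv t := pvLe_fmax t pv
        have hne : pvFmax pv t ≠ x := by omega
        rw [pvIdx]
        simp only [Prod.mk.injEq, true_and]
        split_ifs <;> omega

theorem pvGoB_eq (xs : List (Int × Int × Int)) (ps ss pi ii pr rr k : Int) :
    pvGoB xs (ps, ss, pi, ii, pr, rr) k =
      ((pvGo1 (xs.map (·.1)) ps ss k).1, (pvGo1 (xs.map (·.1)) ps ss k).2,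
       (pvGo1 (xs.map (·.2.1)) pi ii k).1, (pvGo1 (xs.map (·.2.1)) pi ii k).2,
       (pvGo1 (xs.map (·.2.2)) pr rr k).1, (pvGo1 (xs.map (·.2.2)) pr rr k).2) := by
  induction xs generalizing ps ss pi ii pr rr k with
  | nil => simp [pvGoB, pvGo1]
  | cons e t ih =>
    obtain ⟨s, i, r⟩ := e
    simp only [pvGoB, List.map_cons, pvGo1, gt_iff_lt]
    rw [ih]
    split_ifs <;> rfl

-- per-run agreement on a nonempty run
theorem pvRun_eq (rid : Int) (e0 : Int × Int × Int) (rest : List (Int × Int × Int))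
    (results : List (List (String × Int))) :
    (let run := e0 :: rest
     let s_values := run.map (fun e => e.1)
     let i_values := run.map (fun e => e.2.1)
     let r_values := run.map (fun e => e.2.2)
     match PySem.List.max? s_values (fun x => x), PySem.List.max? i_values (fun x => x),
           PySem.List.max? r_values (fun x => x) with
     | some peak_s, some peak_i, some peak_r =>
       let s_step : Int := ((PySem.List.index? s_values peak_s).getD 0 : Nat)
       let i_step : Int := ((PySem.List.index? i_values peak_i).getD 0 : Nat)
       let r_step : Int := ((PySem.List.index? r_values peak_r).getD 0 : Nat)
       results ++ [[("run_id", rid), ("num_peak_susceptible", peak_s),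
                    ("peak_susceptible_step", s_step), ("num_peak_infected", peak_i),
                    ("peak_infected_step", i_step), ("num_peak_recovered", peak_r),
                    ("peak_recovered_step", r_step)]]
     | _, _, _ => results) =
    (match pvGoB rest (e0.1, 0, e0.2.1, 0, e0.2.2, 0) 1 with
     | (ps, ss, pi, ii, pr, rr) =>
       results ++ [[("run_id", rid), ("num_peak_susceptible", ps),
                    ("peak_susceptible_step", ss), ("num_peak_infected", pi),
                    ("peak_infected_step", ii), ("num_peak_recovered", pr),
                    ("peak_recovered_step", rr)]]) := by
  have key2 : ∀ (v : Int) (l : List Int),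
      pvGo1 l v 0 1 =
        (pvFmax v l, (((PySem.List.index? (v :: l) (pvFmax v l)).getD 0 : Nat) : Int)) := by
    intro v l
    have hmem : pvFmax v l ∈ v :: l := by
      rcases pvFmax_cases l v with h | h
      · rw [h]; exact List.mem_cons_self
      · exact List.mem_cons_of_mem _ h
    rw [pvGo1_spec, pvIndex_getD _ _ hmem, pvIdx]
    simp only [Prod.mk.injEq, true_and]
    split_ifs <;> omega
  simp only [List.map_cons, pvMax?_eq, pvGoB_eq, key2]

theorem pvFold_eq (logs : List (List (Int × Int × Int))) (s : Int)
    (acc : List (List (String × Int)))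
    (h : ∀ run ∈ logs, run ≠ []) :
    (PySem.List.enumerate logs s).foldl (fun results p =>
      let run_id := p.1
      let run := p.2
      let s_values := run.map (fun e => e.1)
      let i_values := run.map (fun e => e.2.1)
      let r_values := run.map (fun e => e.2.2)
      match PySem.List.max? s_values (fun x => x), PySem.List.max? i_values (fun x => x),
            PySem.List.max? r_values (fun x => x) with
      | some peak_s, some peak_i, some peak_r =>
        let s_step : Int := ((PySem.List.index? s_values peak_s).getD 0 : Nat)
        let i_step : Int := ((PySem.List.index? i_values peak_i).getD 0 : Nat)
        let r_step : Int := ((PySem.List.index? r_values peak_r).getD 0 : Nat)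
        results ++ [[("run_id", run_id), ("num_peak_susceptible", peak_s),
                     ("peak_susceptible_step", s_step), ("num_peak_infected", peak_i),
                     ("peak_infected_step", i_step), ("num_peak_recovered", peak_r),
                     ("peak_recovered_step", r_step)]]
      | _, _, _ => results) acc =
    (PySem.List.enumerate logs s).foldl (fun results p =>
      match p.2 with
      | [] => results
      | e0 :: rest =>
        match pvGoB rest (e0.1, 0, e0.2.1, 0, e0.2.2, 0) 1 with
        | (ps, ss, pi, ii, pr, rr) =>
          results ++ [[("run_id", p.1), ("num_peak_susceptible", ps),
                       ("peak_susceptible_step", ss), ("num_peak_infected", pi),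
                       ("peak_infected_step", ii), ("num_peak_recovered", pr),
                       ("peak_recovered_step", rr)]]) acc := by
  induction logs generalizing s acc with
  | nil => simp [PySem.List.enumerate_nil]
  | cons run t ih =>
    rw [PySem.List.enumerate_cons]
    simp only [List.foldl_cons]
    obtain ⟨e0, rest⟩ : ∃ e0 rest, run = e0 :: rest := by
      cases run with
      | nil => exact absurd rfl (h [] List.mem_cons_self)
      | cons a b => exact ⟨a, b, rfl⟩
    obtain ⟨rest, rfl⟩ := rest
    rw [pvRun_eq s e0 rest acc]
    exact ih (s + 1) _ (fun r hr => h r (List.mem_cons_of_mem _ hr))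

-- ===== VERDICT (by name: the statement is the Claim_ definition above) =====
theorem get_peak_sir_stats_spec : Claim_equal_get_peak_sir_stats := by
  intro logs _ hpre
  unfold Spec_get_peak_sir_stats get_peak_sir_stats get_peak_sir_stats_alt
  exact pvFold_eq logs 0 [] hpre
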